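-- pv_equiv track=rewrite | github.com/haddeeann/tidbits | pyramid_challenge/import_listy.py | build_pyramid
-- ===== SOURCE A (Python) =====
-- def build_pyramid(pyramid_height):
--     rows = 1
--     numbers_str = 1
--     row_ends = []
--     while rows <= pyramid_height:
--         str_builder = rows
--         build = ''
--         while str_builder > 0:
--             build += str(numbers_str) + ' '
--             if str_builder == 1:
--                 row_ends.append(str(numbers_str))
--             str_builder -= 1
--             numbers_str += 1
--         rows += 1
--     return row_ends
-- ===== SOURCE B (Python) =====
-- def build_pyramid(pyramid_height):
--     # last number of row k is the k-th triangular number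
--     return [str(k * (k + 1) // 2) for k in range(1, pyramid_height + 1)]
-- ===== Notes on version B (the rewrite author's own statement) =====
-- stated objective: faster
-- what changed: Replaces the nested while loops (which build each row string and count every number) with a direct closed-form list of triangular numbers k*(k+1)//2 for k = 1..height.
import Mathlib
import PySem

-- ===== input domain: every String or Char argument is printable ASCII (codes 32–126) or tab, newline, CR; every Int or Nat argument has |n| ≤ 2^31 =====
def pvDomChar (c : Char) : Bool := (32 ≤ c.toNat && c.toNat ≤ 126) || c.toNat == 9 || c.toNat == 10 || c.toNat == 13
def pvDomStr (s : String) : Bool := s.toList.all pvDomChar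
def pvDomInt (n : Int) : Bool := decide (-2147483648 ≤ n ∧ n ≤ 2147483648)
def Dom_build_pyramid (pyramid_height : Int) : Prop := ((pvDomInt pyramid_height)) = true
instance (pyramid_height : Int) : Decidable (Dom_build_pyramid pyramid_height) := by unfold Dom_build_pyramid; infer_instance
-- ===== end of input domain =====

-- B replaces A's nested counting loops with a closed-form map of triangular numbers k*(k+1)//2 (O(n) vs O(n^2)).


-- ===== PORT A =====
-- inner while loop: state (str_builder, numbers_str, build, row_ends); returns (numbers_str, row_ends)
def buildPyramidInner (str_builder numbers_str : Int) (build : String) (row_ends : List String) :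
    Int × List String :=
  if h : str_builder > 0 then
    let build' := build ++ PySem.Int.toStr numbers_str ++ " "
    let row_ends' := if str_builder = 1 then row_ends ++ [PySem.Int.toStr numbers_str] else row_ends
    buildPyramidInner (str_builder - 1) (numbers_str + 1) build' row_ends'
  else (numbers_str, row_ends)
termination_by str_builder.toNat
decreasing_by omega

-- outer while loop
def buildPyramidOuter (rows numbers_str : Int) (row_ends : List String) (pyramid_height : Int) :
    List String :=
  if h : rows ≤ pyramid_height then
    let r := buildPyramidInner rows numbers_str "" row_ends
    buildPyramidOuter (rows + 1) r.1 r.2 pyramid_height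
  else row_ends
termination_by (pyramid_height + 1 - rows).toNat
decreasing_by omega

def build_pyramid (pyramid_height : Int) : List String :=
  buildPyramidOuter 1 1 [] pyramid_height

-- ===== PORT B =====
def build_pyramid_alt (pyramid_height : Int) : List String :=
  (PySem.List.pyRange 1 (pyramid_height + 1) 1).map
    (fun k => PySem.Int.toStr (PySem.Int.floordiv (k * (k + 1)) 2))

-- ===== PRECONDITION & SPEC =====
def Spec_build_pyramid (pyramid_height : Int) (out : List String) : Prop := out = build_pyramid_alt pyramid_height
instance (pyramid_height : Int) (out : List String) : Decidable (Spec_build_pyramid pyramid_height out) := by unfold Spec_build_pyramid; infer_instance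

-- ===== CLAIM (what is proved, stated in full; the proofs are below) =====
def Claim_equal_build_pyramid : Prop := ∀ (pyramid_height : Int), Dom_build_pyramid pyramid_height → Spec_build_pyramid pyramid_height (build_pyramid pyramid_height)

-- ===== LEMMAS AND PROOFS =====

-- the inner loop adds `sb` to numbers_str and appends the string of its last value
lemma buildPyramidInner_eq (n : Nat) (hn : 1 ≤ n) :
    ∀ (num : Int) (build : String) (acc : List String),
      buildPyramidInner (n : Int) num build acc
        = (num + n, acc ++ [PySem.Int.toStr (num + n - 1)]) := by
  induction n with
  | zero => omega
  | succ m ih =>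
    intro num build acc
    rw [buildPyramidInner]
    by_cases hm : m = 0
    · subst hm
      simp only [show ((1:Nat):Int) > 0 by norm_num, dif_pos]
      norm_num
      rw [buildPyramidInner]
      norm_num
    · have h1 : ((m + 1 : Nat) : Int) > 0 := by positivity
      rw [dif_pos h1]
      have hsb : ((m + 1 : Nat) : Int) ≠ 1 := by omega
      simp only [if_neg hsb]
      have hc : ((m + 1 : Nat) : Int) - 1 = (m : Nat) := by push_cast; ring
      rw [hc, ih (by omega)]
      have h2 : num + 1 + (m : Int) = num + ((m + 1 : Nat) : Int) := by push_cast; ring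
      rw [h2]

-- the outer loop, started at row `rows` with the correct running count, appends the
-- triangular numbers of the next k rows
lemma buildPyramidOuter_eq (k : Nat) :
    ∀ (rows num : Int) (acc : List String), 1 ≤ rows → 2 * num = rows * (rows - 1) + 2 →
      buildPyramidOuter rows num acc (rows - 1 + k)
        = acc ++ (PySem.List.pyRange rows (rows + k) 1).map
            (fun i => PySem.Int.toStr (i * (i + 1) / 2)) := by
  induction k with
  | zero =>
    intro rows num acc hr hnum
    rw [buildPyramidOuter, dif_neg (by omega),
      PySem.List.pyRange_one_eq_nil (by omega)]
    simp
  | succ m ih =>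
    intro rows num acc hr hnum
    rw [buildPyramidOuter, dif_pos (by omega)]
    obtain ⟨n, hn, rfl⟩ : ∃ n : Nat, 1 ≤ n ∧ rows = (n : Int) := ⟨rows.toNat, by omega, by omega⟩
    rw [buildPyramidInner_eq n hn]
    have harg : ((n : Int) - 1 + (m + 1 : Nat)) = ((n : Int) + 1) - 1 + (m : Nat) := by
      push_cast; ring
    have hcons : PySem.List.pyRange (n : Int) ((n : Int) + ((m + 1 : Nat) : Int)) 1
        = (n : Int) :: PySem.List.pyRange ((n : Int) + 1) ((n : Int) + 1 + (m : Int)) 1 := by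
      rw [PySem.List.pyRange_one_cons (by push_cast; omega)]
      congr 1
      push_cast; ring
    rw [hcons, harg, ih ((n : Int) + 1) (num + n) _ (by omega) (by nlinarith [hnum])]
    have hlast : num + (n : Int) - 1 = (n : Int) * ((n : Int) + 1) / 2 := by
      have h2 : (n : Int) * ((n : Int) + 1) = 2 * (num + (n : Int) - 1) := by
        linear_combination -hnum
      rw [h2, Int.mul_ediv_cancel_left _ (by norm_num)]
    rw [hlast]
    simp only [List.map_cons, List.append_assoc, List.singleton_append]

-- ===== VERDICT (by name: the statement is the Claim_ definition above) =====
theorem build_pyramid_spec : Claim_equal_build_pyramid := by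
  intro h _
  unfold Spec_build_pyramid build_pyramid build_pyramid_alt
  by_cases hp : h ≤ 0
  · rw [buildPyramidOuter, dif_neg (by omega), PySem.List.pyRange_one_eq_nil (by omega)]
    simp
  · have hh : h = (1 : Int) - 1 + (h.toNat : Nat) := by omega
    rw [hh, buildPyramidOuter_eq h.toNat 1 1 [] (by norm_num) (by ring)]
    have hb : (1 : Int) + (h.toNat : Int) = 1 - 1 + (h.toNat : Int) + 1 := by ring
    rw [hb]
    simp only [List.nil_append]
    refine List.map_congr_left (fun i _ => ?_)
    rw [PySem.Int.floordiv_eq_ediv_of_pos (by norm_num)]
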